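-- pv_equiv track=rewrite | github.com/EnesErcin/Convolutional_Neural_Network_wFPGA | IEEE_Multipication_Addition Emulator_wPython/Functions.py | packtoarray_msb
-- ===== SOURCE A (Python) =====
-- def packtoarray_msb(val,val_len):
--     assert(type(val) == int)                    # This function packs the number to binary array
--     binary_represent = list(str(bin(val)))
--
--     lenofpresentvalues = len(binary_represent)
--
--     mynewlist = binary_represent[val_len-1:0]
--     #binary_represent[lenofpresentvalues-2:till]
--
--     for x in range (0,val_len):
--         if(x<lenofpresentvalues-2):
--             # 0'b represented as
--             mynewlist.append(binary_represent[x+2])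
--         else:
--             mynewlist.append("0")
--
--     return val_len, mynewlist #Testing
-- ===== SOURCE B (Python) =====
-- def packtoarray_msb(val, val_len):
--     assert type(val) == int                     # same int check as A
--     s = str(bin(val))[2:]                       # binary digits (negative keeps 'b...'," as A does)
--     k = max(val_len, 0)
--     return val_len, list(s[:k].ljust(k, '0'))   # truncate to k, right-pad with '0'
-- ===== Notes on version B (the rewrite author's own statement) =====
-- stated objective: simpler
-- what changed: Replaces A's per-index loop (with its bound test on every index and the dead empty slice) by one slice of the binary string truncated to the target length plus a single right-pad (ljust); B is three lines.
import Mathlib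
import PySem

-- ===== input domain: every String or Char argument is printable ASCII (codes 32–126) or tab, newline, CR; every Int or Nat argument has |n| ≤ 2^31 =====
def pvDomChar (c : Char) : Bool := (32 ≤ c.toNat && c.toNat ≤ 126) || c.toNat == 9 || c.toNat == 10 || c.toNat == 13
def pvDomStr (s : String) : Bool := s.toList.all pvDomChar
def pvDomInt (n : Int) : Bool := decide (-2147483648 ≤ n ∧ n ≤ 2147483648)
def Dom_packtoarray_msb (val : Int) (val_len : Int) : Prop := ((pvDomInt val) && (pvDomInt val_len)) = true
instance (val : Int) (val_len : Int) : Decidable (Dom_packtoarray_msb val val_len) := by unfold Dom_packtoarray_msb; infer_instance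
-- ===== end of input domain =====

-- B replaces A's index loop (with its dead slice and per-index bound test) by slice + ljust padding; objective: simpler.

-- ===== PORT A =====
-- list(str(bin(val))): each character of bin(val) as a one-character string
def pvChr (c : Char) : String := String.ofList [c]

def packtoarray_msb (val : Int) (val_len : Int) : Int × List String :=
  let binary_represent : List String := ((PySem.Int.pyBin val).toList).map pvChr
  let lenofpresentvalues : Int := PySem.List.len binary_represent
  let mynewlist : List String := PySem.List.slice binary_represent (some (val_len - 1)) (some 0)
  let result : List String :=
    (PySem.List.pyRange 0 val_len 1).foldl
      (fun acc x =>
        if x < lenofpresentvalues - 2 then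
          acc ++ [PySem.List.pyGetD binary_represent (x + 2) ""]   -- guard makes the index in range
        else
          acc ++ ["0"]) mynewlist
  (val_len, result)

-- ===== PORT B =====
def packtoarray_msb_alt (val : Int) (val_len : Int) : Int × List String :=
  let s : List Char := PySem.List.slice ((PySem.Int.pyBin val).toList) (some 2) none  -- str(bin(val))[2:]
  let k : Int := max val_len 0
  let trunc : List Char := PySem.List.slice s none (some k)                           -- s[:k]
  -- .ljust(k, '0') ported by hand: exact, pads on the right with '0' up to length k
  let padded : List Char := trunc ++ List.replicate (k.toNat - trunc.length) '0'
  (val_len, padded.map pvChr)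

-- ===== PRECONDITION & SPEC =====
def Spec_packtoarray_msb (val : Int) (val_len : Int) (out : Int × List String) : Prop := out = packtoarray_msb_alt val val_len
instance (val : Int) (val_len : Int) (out : Int × List String) : Decidable (Spec_packtoarray_msb val val_len out) := by unfold Spec_packtoarray_msb; infer_instance

-- ===== CLAIM (what is proved, stated in full; the proofs are below) =====
def Claim_equal_packtoarray_msb : Prop := ∀ (val : Int) (val_len : Int), Dom_packtoarray_msb val val_len → Spec_packtoarray_msb val val_len (packtoarray_msb val val_len)

-- ===== LEMMAS AND PROOFS =====

-- the dead slice [val_len-1:0] is always empty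
theorem pv_slice_nil {α : Type} (xs : List α) (a : Int) :
    PySem.List.slice xs (some a) (some 0) = [] := by
  apply List.eq_nil_of_length_eq_zero
  rw [PySem.List.length_slice]
  simp

-- the loop body rewritten as a single append
theorem pv_body (acc : List String) (c : Prop) [Decidable c] (a b : String) :
    (if c then acc ++ [a] else acc ++ [b]) = acc ++ [if c then a else b] := by
  split <;> simp_all

-- core: A's loop output equals B's slice+pad output (both over the char list of bin(val))
theorem pv_core (cs : List Char) (k : Nat) :
    (List.range k).map
        (fun (j : Nat) => if (j : Int) < (cs.length : Int) - 2
                  then PySem.List.pyGetD (cs.map pvChr) ((j : Int) + 2) ""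
                  else "0")
      = ((cs.drop 2).take k ++ List.replicate (k - min k (cs.length - 2)) '0').map pvChr := by
  apply List.ext_getElem
  · simp
  · intro i h1 h2
    simp only [List.getElem_map, List.getElem_range]
    simp only [List.length_map, List.length_range] at h1
    by_cases hc : i + 2 < cs.length
    · have hi : ((i : Int)) < (cs.length : Int) - 2 := by omega
      rw [if_pos hi]
      have hcast : ((i : Int) + 2) = ((i + 2 : Nat) : Int) := by push_cast; ring
      rw [hcast, PySem.List.pyGetD_natCast]
      have hlt : i + 2 < (cs.map pvChr).length := by simpa using hc
      rw [List.getD_eq_getElem _ _ hlt]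
      have hl : i < ((cs.drop 2).take k).length := by simp; omega
      rw [List.getElem_append_left hl]
      simp [List.getElem_take, List.getElem_drop, Nat.add_comm]
    · have hi : ¬ ((i : Int)) < (cs.length : Int) - 2 := by omega
      rw [if_neg hi]
      have hl : ¬ i < ((cs.drop 2).take k).length := by simp; omega
      rw [List.getElem_append_right (by omega)]
      simp [pvChr]

-- ===== VERDICT (by name: the statement is the Claim_ definition above) =====
theorem packtoarray_msb_spec : Claim_equal_packtoarray_msb := by
  intro val val_len _
  unfold Spec_packtoarray_msb packtoarray_msb packtoarray_msb_alt
  simp only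
  refine Prod.ext rfl ?_
  rw [pv_slice_nil]
  have hbody : ∀ (acc : List String) (x : Int),
      (if x < PySem.List.len ((PySem.Int.pyBin val).toList.map pvChr) - 2 then
          acc ++ [PySem.List.pyGetD ((PySem.Int.pyBin val).toList.map pvChr) (x + 2) ""]
        else acc ++ ["0"])
      = acc ++ [if x < PySem.List.len ((PySem.Int.pyBin val).toList.map pvChr) - 2 then
          PySem.List.pyGetD ((PySem.Int.pyBin val).toList.map pvChr) (x + 2) "" else "0"] :=
    fun acc x => pv_body acc _ _ _
  simp only [hbody]
  rw [PySem.List.foldl_append_singleton_eq_map]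
  rw [PySem.List.pyRange_one]
  simp only [List.map_map, List.nil_append, Int.sub_zero, Int.zero_add]
  have hk : (max val_len 0).toNat = val_len.toNat := by omega
  have h2 : PySem.List.slice (PySem.Int.pyBin val).toList (some 2) none
      = (PySem.Int.pyBin val).toList.drop 2 := by
    rw [PySem.List.slice_from]
    · rfl
    · norm_num
  have h3 : PySem.List.slice ((PySem.Int.pyBin val).toList.drop 2) none (some (max val_len 0))
      = ((PySem.Int.pyBin val).toList.drop 2).take val_len.toNat := by
    rw [PySem.List.slice_to]
    · rw [hk]
    · omega
  rw [h2, h3, hk, List.length_take, List.length_drop]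
  have hcore := pv_core (PySem.Int.pyBin val).toList val_len.toNat
  simp only [PySem.List.len_eq, List.length_map]
  exact hcore
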